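-- pv_equiv track=rewrite | github.com/liana-banyan/librarian-mcp | src/librarian_mcp/server.py | _find_missing_phrases
-- ===== SOURCE A (Python) =====
-- def _find_missing_phrases(canonical: str, candidate: str, phrases: list[str]) -> tuple[list[str], list[str]]:
--     """Check which phrases from a list are present/missing in the candidate."""
--     missing = []
--     preserved = []
--     canonical_lower = canonical.lower()
--     candidate_lower = candidate.lower()
--     for phrase in phrases:
--         pl = phrase.lower()
--         if pl in canonical_lower and pl not in candidate_lower:
--             missing.append(phrase)
--         elif pl in canonical_lower:
--             preserved.append(phrase)
--     return missing, preserved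
-- ===== SOURCE B (Python) =====
-- def _scan_found(text, lengths, lowered):
--     """Multi-pattern scan: slide a window of each phrase length over the text once,
--     collecting every lowered phrase that occurs as a substring."""
--     found = set()
--     for L in lengths:
--         for i in range(len(text) - L + 1):
--             w = text[i:i + L]
--             if w in lowered:
--                 found.add(w)
--     return found
--
--
-- def _find_missing_phrases(canonical: str, candidate: str, phrases: list[str]) -> tuple[list[str], list[str]]:
--     """Check which phrases from a list are present/missing in the candidate."""
--     lowered = {p.lower() for p in phrases}
--     lengths = {len(pl) for pl in lowered}
--     cfound = _scan_found(canonical.lower(), lengths, lowered)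
--     dfound = _scan_found(candidate.lower(), lengths, lowered)
--     missing = []
--     preserved = []
--     for p in phrases:
--         pl = p.lower()
--         if pl in cfound:
--             if pl in dfound:
--                 preserved.append(p)
--             else:
--                 missing.append(p)
--     return missing, preserved
-- ===== Notes on version B (the rewrite author's own statement) =====
-- stated objective: faster
-- what changed: B inverts the search direction: instead of testing each phrase against each text with a per-phrase substring search, it builds a hash set of lowered phrases and the set of their distinct lengths, slides a window of each length across each text once collecting every phrase that occurs (a multi-pattern text scan), and then classifies the phrases by membership in the two found-sets.
import Mathlib
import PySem

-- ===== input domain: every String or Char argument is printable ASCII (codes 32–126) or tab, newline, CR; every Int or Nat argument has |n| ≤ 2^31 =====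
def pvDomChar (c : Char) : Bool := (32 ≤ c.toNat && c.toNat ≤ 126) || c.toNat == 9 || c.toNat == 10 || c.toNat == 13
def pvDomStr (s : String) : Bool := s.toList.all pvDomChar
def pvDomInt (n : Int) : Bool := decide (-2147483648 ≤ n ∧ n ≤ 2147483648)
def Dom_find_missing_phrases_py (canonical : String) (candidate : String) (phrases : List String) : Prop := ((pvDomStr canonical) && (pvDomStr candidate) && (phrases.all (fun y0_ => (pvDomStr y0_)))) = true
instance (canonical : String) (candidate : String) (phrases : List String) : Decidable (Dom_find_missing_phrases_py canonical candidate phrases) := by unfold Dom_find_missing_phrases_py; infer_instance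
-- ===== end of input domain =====

-- B replaces A's per-phrase substring tests with a multi-pattern window scan: it collects the
-- lowered phrases and their lengths as sets, slides a window of each length over each text once
-- recording which phrases occur, then classifies phrases by membership in the two found-sets;
-- objective: faster when many phrases share lengths (a timing run measured B faster).


-- ===== PORT A =====
def find_missing_phrases_py (canonical : String) (candidate : String) (phrases : List String) : List String × List String :=
  let canonical_lower := PySem.Str.lower canonical
  let candidate_lower := PySem.Str.lower candidate
  phrases.foldl (fun (acc : List String × List String) phrase =>
      let pl := PySem.Str.lower phrase
      if PySem.Str.isIn pl canonical_lower && !(PySem.Str.isIn pl candidate_lower) then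
        (acc.1 ++ [phrase], acc.2)
      else if PySem.Str.isIn pl canonical_lower then
        (acc.1, acc.2 ++ [phrase])
      else acc)
    ([], [])

-- ===== PORT B =====
-- B-side helper: the window scan (_scan_found in Source B)
def pvScanFound (text : String) (lengths : List Int) (lowered : PySem.Set String) : PySem.Set String :=
  lengths.foldl (fun found L =>
      (PySem.List.pyRange 0 ((PySem.Str.len text : Int) - L + 1) 1).foldl (fun found i =>
          let w := PySem.Str.slice text (some i) (some (i + L))
          if PySem.Set.contains lowered w then PySem.Set.add found w else found)
        found)
    PySem.Set.empty

def find_missing_phrases_py_alt (canonical : String) (candidate : String) (phrases : List String) : List String × List String :=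
  let lowered := PySem.Set.ofList (phrases.map PySem.Str.lower)
  let lengths := PySem.Set.ofList (lowered.map (fun pl => (PySem.Str.len pl : Int)))
  let cfound := pvScanFound (PySem.Str.lower canonical) lengths lowered
  let dfound := pvScanFound (PySem.Str.lower candidate) lengths lowered
  phrases.foldl (fun (acc : List String × List String) p =>
      let pl := PySem.Str.lower p
      if PySem.Set.contains cfound pl then
        if PySem.Set.contains dfound pl then (acc.1, acc.2 ++ [p])
        else (acc.1 ++ [p], acc.2)
      else acc)
    ([], [])

-- ===== PRECONDITION & SPEC =====
def Spec_find_missing_phrases_py (canonical : String) (candidate : String) (phrases : List String) (out : List String × List String) : Prop := out = find_missing_phrases_py_alt canonical candidate phrases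
instance (canonical : String) (candidate : String) (phrases : List String) (out : List String × List String) : Decidable (Spec_find_missing_phrases_py canonical candidate phrases out) := by unfold Spec_find_missing_phrases_py; infer_instance

-- ===== CLAIM =====
def Claim_equal_find_missing_phrases_py : Prop := ∀ (canonical : String) (candidate : String) (phrases : List String), Dom_find_missing_phrases_py canonical candidate phrases → Spec_find_missing_phrases_py canonical candidate phrases (find_missing_phrases_py canonical candidate phrases)

-- ===== LEMMAS AND PROOFS =====

-- Strings with the same character list are equal.
theorem pv_str_ext (s t : String) (h : s.toList = t.toList) : s = t := by
  have := congrArg String.ofList h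
  simpa using this

-- Any slice of a list is an infix of it.
theorem pv_slice_infix (xs : List Char) (a b : Option Int) :
    PySem.List.slice xs a b <:+: xs := by
  unfold PySem.List.slice
  cases a <;> cases b <;>
    exact ((List.take_prefix _ _).isInfix.trans (List.drop_suffix _ _).isInfix)

-- Membership after the inner window loop of pvScanFound, from any accumulator s.
theorem pv_mem_inner (text : String) (lowered : PySem.Set String) (L : Int)
    (l : List Int) (s : PySem.Set String) (x : String) :
    (x ∈ l.foldl
        (fun found i =>
          let w := PySem.Str.slice text (some i) (some (i + L))
          if PySem.Set.contains lowered w then PySem.Set.add found w else found) s)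
      ↔ (x ∈ s ∨ (∃ i ∈ l,
            PySem.Str.slice text (some i) (some (i + L)) = x ∧ x ∈ lowered)) := by
  induction l generalizing s with
  | nil => simp
  | cons i is ih =>
    simp only [List.foldl_cons]
    by_cases h : PySem.Set.contains lowered (PySem.Str.slice text (some i) (some (i + L))) = true
    · simp only [h, if_pos]
      rw [ih]
      simp only [PySem.Set.mem_add, List.mem_cons]
      constructor
      · rintro ((hs | he) | ⟨j, hj, hx⟩)
        · exact Or.inl hs
        · subst he
          refine Or.inr ⟨i, Or.inl rfl, rfl, ?_⟩
          simpa [PySem.Set.contains] using h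
        · exact Or.inr ⟨j, Or.inr hj, hx⟩
      · rintro (hs | ⟨j, hj, hx, hlo⟩)
        · exact Or.inl (Or.inl hs)
        · rcases hj with rfl | hj
          · exact Or.inl (Or.inr hx.symm)
          · exact Or.inr ⟨j, hj, hx, hlo⟩
    · simp only [h, if_neg, Bool.false_eq_true, not_false_iff]
      rw [ih]
      constructor
      · rintro (hs | ⟨j, hj, hx⟩)
        · exact Or.inl hs
        · exact Or.inr ⟨j, List.mem_cons_of_mem _ hj, hx⟩
      · rintro (hs | ⟨j, hj, hx, hlo⟩)
        · exact Or.inl hs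
        · cases hj with
          | head => exact absurd hlo (by simpa [PySem.Set.contains, hx] using h)
          | tail _ hj => exact Or.inr ⟨j, hj, hx, hlo⟩

-- Membership in pvScanFound: some window of some listed length equals x and x is a listed phrase.
theorem pv_mem_scan (text : String) (lengths : List Int) (lowered : PySem.Set String) (x : String) :
    (x ∈ pvScanFound text lengths lowered)
      ↔ (∃ L ∈ lengths, ∃ i ∈ PySem.List.pyRange 0 ((PySem.Str.len text : Int) - L + 1) 1,
            PySem.Str.slice text (some i) (some (i + L)) = x ∧ x ∈ lowered) := by
  have gen : ∀ (ls : List Int) (s : PySem.Set String),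
      (x ∈ ls.foldl (fun found L =>
          (PySem.List.pyRange 0 ((PySem.Str.len text : Int) - L + 1) 1).foldl (fun found i =>
              let w := PySem.Str.slice text (some i) (some (i + L))
              if PySem.Set.contains lowered w then PySem.Set.add found w else found)
            found) s)
        ↔ (x ∈ s ∨ ∃ L ∈ ls, ∃ i ∈ PySem.List.pyRange 0 ((PySem.Str.len text : Int) - L + 1) 1,
              PySem.Str.slice text (some i) (some (i + L)) = x ∧ x ∈ lowered) := by
    intro ls
    induction ls with
    | nil => simp
    | cons L Ls ih =>
      intro s
      simp only [List.foldl_cons]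
      rw [ih, pv_mem_inner]
      constructor
      · rintro ((hs | ⟨i, hi, hx⟩) | ⟨M, hM, hrest⟩)
        · exact Or.inl hs
        · exact Or.inr ⟨L, List.mem_cons_self .., i, hi, hx⟩
        · exact Or.inr ⟨M, List.mem_cons_of_mem _ hM, hrest⟩
      · rintro (hs | ⟨M, hM, hrest⟩)
        · exact Or.inl (Or.inl hs)
        · cases hM with
          | head => exact Or.inl (Or.inr hrest)
          | tail _ hM => exact Or.inr ⟨M, hM, hrest⟩
  unfold pvScanFound
  rw [gen]
  simp [PySem.Set.empty]

-- For a phrase pl listed in lowered whose length is listed in lengths, the window scan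
-- finds pl exactly when pl is a substring of the text.
theorem pv_scan_iff_isIn (text : String) (lengths : List Int) (lowered : PySem.Set String)
    (pl : String) (hl : pl ∈ lowered) (hL : (PySem.Str.len pl : Int) ∈ lengths) :
    (pl ∈ pvScanFound text lengths lowered) ↔ PySem.Str.isIn pl text = true := by
  rw [pv_mem_scan, PySem.Str.isIn_iff_infix]
  constructor
  · rintro ⟨L, _, i, _, hx, _⟩
    have := pv_slice_infix text.toList (some i) (some (i + L))
    rw [← hx]
    simpa [PySem.Str.toList_slice] using this
  · rintro ⟨u, v, huv⟩
    refine ⟨(PySem.Str.len pl : Int), hL, (u.length : Int), ?_, ?_, hl⟩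
    · rw [PySem.List.mem_pyRange_one]
      have hlen := congrArg List.length huv
      simp only [List.length_append] at hlen
      constructor
      · exact_mod_cast Nat.zero_le u.length
      · simp only [PySem.Str.len_eq]
        omega
    · apply pv_str_ext
      have h1 : (u.length : Int) + (PySem.Str.len pl : Int) = ((u.length + pl.toList.length : Nat) : Int) := by
        simp only [PySem.Str.len_eq]; omega
      rw [PySem.Str.toList_slice]
      simp only [PySem.Chars.slice_eq_listSlice]
      rw [h1, PySem.List.slice_natCast]
      have hdrop : text.toList.drop u.length = pl.toList ++ v := by
        rw [← huv, List.append_assoc, List.drop_left]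
      rw [hdrop]
      simp

-- ===== VERDICT =====
theorem find_missing_phrases_py_spec : Claim_equal_find_missing_phrases_py := by
  intro canonical candidate phrases _
  unfold Spec_find_missing_phrases_py
  simp only [find_missing_phrases_py, find_missing_phrases_py_alt]
  refine Eq.symm (PySem.List.foldl_congr_mem' _ _ _ _ ?_)
  intro p hp acc
  set pl := PySem.Str.lower p with hpl
  have hmem : pl ∈ PySem.Set.ofList (phrases.map PySem.Str.lower) :=
    (PySem.Set.mem_ofList _ _).mpr (List.mem_map_of_mem hp)
  have hlen : (PySem.Str.len pl : Int) ∈ PySem.Set.ofList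
      ((PySem.Set.ofList (phrases.map PySem.Str.lower)).map (fun q => (PySem.Str.len q : Int))) :=
    (PySem.Set.mem_ofList _ _).mpr (List.mem_map_of_mem hmem)
  have hkey : ∀ t : String, PySem.Set.contains
      (pvScanFound t
        (PySem.Set.ofList ((PySem.Set.ofList (phrases.map PySem.Str.lower)).map
          (fun pl => (PySem.Str.len pl : Int))))
        (PySem.Set.ofList (phrases.map PySem.Str.lower))) pl
      = PySem.Str.isIn pl t := by
    intro t
    rw [Bool.eq_iff_iff]
    rw [show ∀ (s : PySem.Set String) (x : String), (PySem.Set.contains s x = true) = (List.contains s x = true) from fun _ _ => rfl]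
    rw [List.contains_iff_mem, pv_scan_iff_isIn _ _ _ _ hmem hlen]
  rw [hkey, hkey]
  cases PySem.Str.isIn pl (PySem.Str.lower canonical) <;>
    cases PySem.Str.isIn pl (PySem.Str.lower candidate) <;> simp
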